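-- pv_equiv track=rewrite | github.com/JoeTong-95/edge-vit-pipeline | src/metadata-output-layer/metadata_output_layer.py | _rows_from_parallel_lists
-- ===== SOURCE A (Python) =====
-- from typing import Any, Iterable
--
-- def _rows_from_parallel_lists(package: dict, required_key: str) -> list[dict[str, Any]]:
--     """
--     Convert a dict-of-parallel-lists package into a list of row dicts.
--     If the required key is missing or not list-like, returns [].
--     """
--     if not isinstance(package, dict) or required_key not in package:
--         return []
--
--     required_vals = package.get(required_key)
--     if not isinstance(required_vals, (list, tuple)):
--         return []
--
--     # Identify keys that are parallel sequences of the same length.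
--     n = len(required_vals)
--     parallel_keys: list[str] = []
--     for k, v in package.items():
--         if isinstance(v, (list, tuple)) and len(v) == n:
--             parallel_keys.append(k)
--
--     parallel_keys_sorted = sorted(parallel_keys)
--     rows: list[dict[str, Any]] = []
--     for i in range(n):
--         row = {k: package[k][i] for k in parallel_keys_sorted}
--         rows.append(row)
--     return rows
-- ===== SOURCE B (Python) =====
-- from typing import Any
--
--
-- def _rows_from_parallel_lists(package: dict, required_key: str) -> list[dict[str, Any]]:
--     """Accumulator fold: start from n empty row dicts and grow them column by
--     column — one pass over the sorted keys, extending every row with that key's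
--     value, instead of assembling each row separately per index."""
--     if not isinstance(package, dict) or required_key not in package:
--         return []
--     required_vals = package.get(required_key)
--     if not isinstance(required_vals, (list, tuple)):
--         return []
--     n = len(required_vals)
--     rows: list[dict[str, Any]] = [{} for _ in range(n)]
--     for k in sorted(package):
--         v = package[k]
--         if isinstance(v, (list, tuple)) and len(v) == n:
--             for row, val in zip(rows, v):
--                 row[k] = val
--     return rows
-- ===== Notes on version B (the rewrite author's own statement) =====
-- stated objective: alternative
-- what changed: Instead of filtering/sorting the parallel keys and then assembling each row dict separately per index i, B starts from n empty row dicts and folds over all sorted keys, filtering inline and extending every partial row with that key's value (column-by-column accumulation).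
import Mathlib
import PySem

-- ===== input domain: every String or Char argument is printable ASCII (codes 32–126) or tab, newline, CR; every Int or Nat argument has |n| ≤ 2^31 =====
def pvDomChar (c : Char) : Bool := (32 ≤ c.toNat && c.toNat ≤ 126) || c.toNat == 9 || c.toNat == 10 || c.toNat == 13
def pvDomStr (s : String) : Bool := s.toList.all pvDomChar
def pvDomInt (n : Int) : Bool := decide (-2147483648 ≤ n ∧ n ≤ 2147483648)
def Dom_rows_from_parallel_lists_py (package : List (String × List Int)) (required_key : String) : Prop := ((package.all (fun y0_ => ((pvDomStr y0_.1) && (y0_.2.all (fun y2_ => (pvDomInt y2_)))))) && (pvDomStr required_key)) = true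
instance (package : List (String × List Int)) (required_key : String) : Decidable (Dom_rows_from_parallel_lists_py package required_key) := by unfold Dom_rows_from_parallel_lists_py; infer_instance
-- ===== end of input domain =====

-- B replaces A's per-index row assembly by a single fold over the sorted keys that
-- grows n accumulator rows column by column; the return values are proved equal.

-- ===== PORT A =====
-- A, literally: lookup the required key; collect keys whose column has the same length;
-- sort them; then for i in range(n) build the row {k: package[k][i]}.
-- package[k] / package[k][i] never miss (k comes from items, i < n = column length),
-- so the KeyError/IndexError cases are ported with the default of getD/pyGetD.
def rows_from_parallel_lists_py (package : List (String × List Int)) (required_key : String) : List (List (String × Int)) :=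
  let d := PySem.Dict.ofList package
  match d.get? required_key with
  | none => []
  | some required_vals =>
    let n : Nat := required_vals.length
    let parallel_keys : List String :=
      (d.items.filter (fun kv => kv.2.length == n)).map Prod.fst
    let parallel_keys_sorted := PySem.List.sorted parallel_keys (fun k => k) false
    (PySem.List.pyRange 0 (n : Int) 1).map (fun i =>
      parallel_keys_sorted.map (fun k => (k, PySem.List.pyGetD (d.getD k []) i 0)))

-- ===== PORT B =====
-- B, literally: start from n empty row dicts, fold over sorted(package) (all keys,
-- sorted), and for each key whose column has length n extend every row (zip rows v)
-- with that key's value. 'row[k] = val' always inserts a FRESH key (dict keys are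
-- distinct and each key is visited once), so the dict insert is exactly an append.
def rows_from_parallel_lists_py_alt (package : List (String × List Int)) (required_key : String) : List (List (String × Int)) :=
  let d := PySem.Dict.ofList package
  match d.get? required_key with
  | none => []
  | some required_vals =>
    let n : Nat := required_vals.length
    let init : List (List (String × Int)) := List.replicate n []
    (PySem.List.sorted d.keys (fun k => k) false).foldl
      (fun rows k =>
        let v := d.getD k []
        if v.length == n then (rows.zip v).map (fun rv => rv.1 ++ [(k, rv.2)]) else rows)
      init

-- ===== PRECONDITION & SPEC =====
def Spec_rows_from_parallel_lists_py (package : List (String × List Int)) (required_key : String) (out : List (List (String × Int))) : Prop := out = rows_from_parallel_lists_py_alt package required_key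
instance (package : List (String × List Int)) (required_key : String) (out : List (List (String × Int))) : Decidable (Spec_rows_from_parallel_lists_py package required_key out) := by unfold Spec_rows_from_parallel_lists_py; infer_instance

-- ===== CLAIM =====
def Claim_equal_rows_from_parallel_lists_py : Prop := ∀ (package : List (String × List Int)) (required_key : String), Dom_rows_from_parallel_lists_py package required_key → Spec_rows_from_parallel_lists_py package required_key (rows_from_parallel_lists_py package required_key)

-- ===== LEMMAS AND PROOFS =====

-- zip of a range-indexed list with a column of the same length, pointwise.
theorem zip_map_range (n : Nat) (f : Nat → List (String × Int)) (v : List Int)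
    (hv : v.length = n) :
    ((List.range n).map f).zip v = (List.range n).map (fun i => (f i, v.getD i 0)) := by
  apply List.ext_getElem
  · simp [hv]
  · intro i h1 h2
    have hi : i < n := by simpa using h2
    simp [List.getD_eq_getElem?_getD, List.getElem?_eq_getElem (by omega : i < v.length)]

-- Invariant of B's fold: after processing ks, row i is its previous content
-- followed by (k, col k !! i) for the passing keys of ks, in order.
theorem fold_inv (n : Nat) (col : String → List Int) :
    ∀ (ks : List String) (f : Nat → List (String × Int)),
    ks.foldl
      (fun rows k =>
        if (col k).length == n then (rows.zip (col k)).map (fun rv => rv.1 ++ [(k, rv.2)]) else rows)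
      ((List.range n).map f)
    = (List.range n).map (fun i =>
        f i ++ (ks.filter (fun k => (col k).length == n)).map (fun k => (k, (col k).getD i 0))) := by
  intro ks
  induction ks with
  | nil => intro f; simp
  | cons k ks ih =>
    intro f
    by_cases h : (col k).length = n
    · simp only [List.foldl_cons, List.filter_cons, h, beq_self_eq_true, if_true,
        zip_map_range n f (col k) h, List.map_map, Function.comp_def]
      rw [ih (fun i => f i ++ [(k, (col k).getD i 0)])]
      refine List.map_congr_left (fun i _ => ?_)
      simp [List.append_assoc]
    · have hb : ((col k).length == n) = false := by simpa using h
      simp only [List.foldl_cons, List.filter_cons, hb]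
      exact ih f

-- A's sorted parallel-key list equals B's inline filter of the sorted full key list.
theorem keys_sorted_filter (package : List (String × List Int)) (n : Nat) :
    PySem.List.sorted
      (((PySem.Dict.ofList package).items.filter (fun kv => kv.2.length == n)).map Prod.fst)
      (fun k => k) false
    = (PySem.List.sorted (PySem.Dict.ofList package).keys (fun k => k) false).filter
        (fun k => ((PySem.Dict.ofList package).getD k []).length == n) := by
  set d := PySem.Dict.ofList package with hd
  set p : String → Bool := fun k => (d.getD k []).length == n with hp
  have hndk : d.keys.Nodup := PySem.Dict.nodup_keys_ofList package
  have hfe : d.items.filter (fun kv => p kv.1) = d.items.filter (fun kv => kv.2.length == n) := by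
    refine List.filter_congr (fun kv hkv => ?_)
    have := PySem.Dict.getD_of_mem_items d hkv hndk ([] : List Int)
    simp [hp, this]
  apply PySem.List.sorted_eq_of_perm_of_pairwise_lt
  · -- the filtered sorted keys are a permutation of the filtered items' keys
    have h1 : ((PySem.List.sorted d.keys (fun k => k) false).filter p).Perm (d.keys.filter p) :=
      (PySem.List.sorted_perm d.keys (fun k => k) false).filter p
    have h2 : d.keys.filter p = (d.items.filter (fun kv => kv.2.length == n)).map Prod.fst := by
      have : d.keys = d.items.map Prod.fst := by simp [PySem.Dict.keys]
      rw [this, List.filter_map, ← hfe]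
      simp [Function.comp_def]
    rw [h2] at h1
    exact h1
  · -- the filter of a strictly increasing list is strictly increasing
    have hle : (PySem.List.sorted d.keys (fun k => k) false).Pairwise (fun a b => a ≤ b) :=
      PySem.List.sorted_pairwise d.keys (fun k => k)
    have hnd : (PySem.List.sorted d.keys (fun k => k) false).Nodup :=
      ((PySem.List.sorted_perm d.keys (fun k => k) false).nodup_iff).mpr hndk
    have hlt : (PySem.List.sorted d.keys (fun k => k) false).Pairwise (fun a b => a < b) :=
      (hle.and hnd).imp (fun h => lt_of_le_of_ne h.1 h.2)
    exact List.Pairwise.filter p hlt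

theorem rows_equal (package : List (String × List Int)) (required_key : String) :
    rows_from_parallel_lists_py package required_key
      = rows_from_parallel_lists_py_alt package required_key := by
  unfold rows_from_parallel_lists_py rows_from_parallel_lists_py_alt
  cases hget : (PySem.Dict.ofList package).get? required_key with
  | none => simp [hget]
  | some required_vals =>
    simp only [hget]
    set d := PySem.Dict.ofList package with hd
    set n : Nat := required_vals.length with hn
    -- B side: replicate n [] is (range n).map (const []), then apply the fold invariant
    have hrep : (List.replicate n ([] : List (String × Int)))
        = (List.range n).map (fun _ => []) := by
      simp
    rw [hrep, fold_inv n (fun k => d.getD k [])]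
    -- A side: pyRange over a natural bound, pyGetD at a cast index
    rw [PySem.List.pyRange_zero_natCast, List.map_map]
    rw [keys_sorted_filter package n, ← hd]
    refine List.map_congr_left (fun i _ => ?_)
    simp [Function.comp]

-- ===== VERDICT =====
theorem rows_from_parallel_lists_py_spec : Claim_equal_rows_from_parallel_lists_py := by
  intro package required_key _
  unfold Spec_rows_from_parallel_lists_py
  exact rows_equal package required_key
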